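-- pv_equiv track=rewrite | github.com/derHahn/SBtab | web2py/applications/SBtab/modules/splitTabs.py | splitDocumentInTables
-- ===== SOURCE A (Python) =====
-- def splitDocumentInTables(document_rows):
--     '''
--     if the document contains more than one SBtab, this function splits the document
--     into the single SBtabs
--     '''
--     single_sbtab = [document_rows[0]]
--     sbtab_list   = []
--     for row in document_rows[1:]:
--         if not row.startswith('!!'):
--             single_sbtab.append(row)
--         else:
--             sbtab_list.append(single_sbtab)
--             single_sbtab = [row]
--     sbtab_list.append(single_sbtab)
--
--     return sbtab_list
-- ===== SOURCE B (Python) =====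
-- def splitDocumentInTables(document_rows):
--     '''
--     if the document contains more than one SBtab, this function splits the document
--     into the single SBtabs
--     '''
--     tables = []
--     group = []
--     for row in reversed(document_rows[1:]):
--         group.append(row)
--         if row.startswith('!!'):
--             tables.append(group[::-1])
--             group = []
--     tables.append([document_rows[0]] + group[::-1])
--     tables.reverse()
--     return tables
-- ===== Notes on version B (the rewrite author's own statement) =====
-- stated objective: alternative
-- what changed: B traverses the rows in reverse and builds the groups back-to-front, emitting a group exactly when its '!!' header row is reached and reversing once at the end, instead of A's forward loop with a running accumulator flushed at each delimiter.
import Mathlib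
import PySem

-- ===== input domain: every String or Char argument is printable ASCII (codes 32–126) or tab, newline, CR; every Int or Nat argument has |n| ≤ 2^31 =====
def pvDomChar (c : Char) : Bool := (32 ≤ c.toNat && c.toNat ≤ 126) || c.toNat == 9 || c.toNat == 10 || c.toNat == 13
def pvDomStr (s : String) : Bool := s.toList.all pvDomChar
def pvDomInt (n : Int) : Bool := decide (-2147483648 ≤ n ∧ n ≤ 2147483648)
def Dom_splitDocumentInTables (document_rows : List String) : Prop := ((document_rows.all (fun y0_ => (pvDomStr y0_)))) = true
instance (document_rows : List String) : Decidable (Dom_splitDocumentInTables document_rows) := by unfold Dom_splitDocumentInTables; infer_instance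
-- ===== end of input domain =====

-- B builds the groups back-to-front in one reverse pass instead of A's forward flush loop (alternative decomposition, same cost).


-- ===== PORT A =====
-- A's loop body: append to the running group, or flush it and start a new one
def pvStepA (s : List String × List (List String)) (row : String) : List String × List (List String) :=
  if ¬ PySem.Str.startswith row "!!" then (s.1 ++ [row], s.2)
  else ([row], s.2 ++ [s.1])

def splitDocumentInTables (document_rows : List String) : List (List String) :=
  match PySem.List.pyGet? document_rows 0 with
  | none => []  -- document_rows[0] raises IndexError in Python; excluded by Pre_
  | some h =>
    let st := (PySem.List.slice document_rows (some 1) none).foldl pvStepA ([h], [])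
    st.2 ++ [st.1]

-- ===== PORT B =====
-- B's loop body (reverse traversal): collect rows; a '!!' row completes its group
def pvStepB (s : List String × List (List String)) (row : String) : List String × List (List String) :=
  let group := s.1 ++ [row]
  if PySem.Str.startswith row "!!" then ([], s.2 ++ [group.reverse])
  else (group, s.2)

def splitDocumentInTables_alt (document_rows : List String) : List (List String) :=
  let st := ((PySem.List.slice document_rows (some 1) none).reverse).foldl pvStepB ([], [])
  match PySem.List.pyGet? document_rows 0 with
  | none => []  -- document_rows[0] raises IndexError in Python; excluded by Pre_
  | some h => (st.2 ++ [[h] ++ st.1.reverse]).reverse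

-- ===== PRECONDITION & SPEC =====
-- Pre_ excludes exactly the empty list, on which Python A (and B) raise IndexError at document_rows[0].
def Pre_splitDocumentInTables (document_rows : List String) : Prop := document_rows ≠ []
instance (document_rows : List String) : Decidable (Pre_splitDocumentInTables document_rows) := by unfold Pre_splitDocumentInTables; infer_instance

def pvWitness_splitDocumentInTables : List String :=
  ["!!SBtab TableName='a'", "!A", "x", "!!SBtab TableName='b'", "y"]

def Spec_splitDocumentInTables (document_rows : List String) (out : List (List String)) : Prop := out = splitDocumentInTables_alt document_rows
instance (document_rows : List String) (out : List (List String)) : Decidable (Spec_splitDocumentInTables document_rows out) := by unfold Spec_splitDocumentInTables; infer_instance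

-- ===== CLAIM (what is proved, stated in full; the proofs are below) =====
def Claim_equal_splitDocumentInTables : Prop := ∀ (document_rows : List String), Dom_splitDocumentInTables document_rows → Pre_splitDocumentInTables document_rows → Spec_splitDocumentInTables document_rows (splitDocumentInTables document_rows)

-- ===== LEMMAS AND PROOFS =====

-- canonical description of the grouping: current group 'acc', remaining rows
def pvG (acc : List String) (xs : List String) : List (List String) :=
  match xs with
  | [] => [acc]
  | r :: rest =>
    if PySem.Str.startswith r "!!" then acc :: pvG [r] rest
    else pvG (acc ++ [r]) rest

-- B's fold, written as a foldr over the (unreversed) tail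
def pvF (xs : List String) : List String × List (List String) :=
  xs.foldr (fun row s => pvStepB s row) ([], [])

theorem pvA_eq_pvG (xs : List String) : ∀ (acc : List String) (out : List (List String)),
    (xs.foldl pvStepA (acc, out)).2 ++ [(xs.foldl pvStepA (acc, out)).1] = out ++ pvG acc xs := by
  induction xs with
  | nil => intro acc out; simp [pvG]
  | cons r rest ih =>
    intro acc out
    by_cases h : PySem.Chars.startswith r.toList ['!', '!'] = true
    · simp [pvG, pvStepA, h, ih]
    · simp [pvG, pvStepA, h, ih]

theorem pvB_eq_pvG (xs : List String) : ∀ (acc : List String),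
    (acc ++ (pvF xs).1.reverse) :: (pvF xs).2.reverse = pvG acc xs := by
  induction xs with
  | nil => intro acc; simp [pvF, pvG]
  | cons r rest ih =>
    intro acc
    by_cases h : PySem.Chars.startswith r.toList ['!', '!'] = true
    · have := ih [r]
      simp only [pvF, List.foldr_cons] at this ⊢
      simp [pvG, pvStepB, h, ← this]
    · have := ih (acc ++ [r])
      simp only [pvF, List.foldr_cons] at this ⊢
      simp [pvG, pvStepB, h, ← this]

-- ===== VERDICT (by name: the statement is the Claim_ definition above) =====
theorem splitDocumentInTables_spec : Claim_equal_splitDocumentInTables := by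
  intro rows _ hPre
  unfold Spec_splitDocumentInTables
  match rows with
  | [] => exact absurd rfl hPre
  | x :: xs =>
    unfold splitDocumentInTables splitDocumentInTables_alt
    rw [PySem.List.slice_from_one]
    simp only [PySem.List.pyGet?_zero_cons, List.tail_cons, List.foldl_reverse]
    have hA := pvA_eq_pvG xs [x] []
    have hB := pvB_eq_pvG xs [x]
    simp only [List.nil_append] at hA
    rw [hA, ← hB]
    show _ = ((pvF xs).2 ++ [[x] ++ (pvF xs).1.reverse]).reverse
    simp
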